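-- pv_equiv track=rewrite | github.com/donnadietz/barryciprapuzzle | magic.py | Collides
-- ===== SOURCE A (Python) =====
-- def Collides(k1,k2):
--     s=set()
--     for e in k1[0]:
--         s.add(e)
--     for e in k1[1]:
--         s.add(e)
--     for e in k2[0]:
--         s.add(e)
--     for e in k2[1]:
--         s.add(e)
--     if len(s)==len(k1[0])+len(k1[1])+len(k2[0])+len(k2[1]):
--         return False
--     else:
--         return True
-- ===== SOURCE B (Python) =====
-- def Collides(k1, k2):
--     cat = k1[0] + k1[1] + k2[0] + k2[1]
--     s = sorted(cat)
--     return any(a == b for a, b in zip(s, s[1:]))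
-- ===== Notes on version B (the rewrite author's own statement) =====
-- stated objective: alternative
-- what changed: B detects a duplicate by sorting the concatenation of the four lists and scanning adjacent pairs for equality, instead of A's hash-set construction with a size comparison.
import Mathlib
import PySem

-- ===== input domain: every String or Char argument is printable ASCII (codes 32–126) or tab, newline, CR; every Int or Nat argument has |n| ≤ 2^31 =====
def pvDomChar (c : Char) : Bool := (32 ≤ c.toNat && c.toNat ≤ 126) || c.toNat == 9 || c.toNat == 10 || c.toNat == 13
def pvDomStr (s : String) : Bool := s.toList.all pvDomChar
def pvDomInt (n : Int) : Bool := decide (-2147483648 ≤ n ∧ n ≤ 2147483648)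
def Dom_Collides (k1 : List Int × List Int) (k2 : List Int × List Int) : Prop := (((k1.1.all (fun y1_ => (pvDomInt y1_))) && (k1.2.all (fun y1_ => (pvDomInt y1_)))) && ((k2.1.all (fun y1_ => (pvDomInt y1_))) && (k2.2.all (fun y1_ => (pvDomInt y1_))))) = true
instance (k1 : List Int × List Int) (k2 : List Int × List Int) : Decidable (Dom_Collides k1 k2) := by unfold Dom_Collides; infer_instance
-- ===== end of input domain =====

-- B detects a duplicate by sorting the concatenation and scanning adjacent pairs,
-- instead of A's set construction with a size comparison (objective: alternative algorithm).

-- ===== PORT A =====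
def Collides (k1 : List Int × List Int) (k2 : List Int × List Int) : Bool :=
  let s : PySem.Set Int := PySem.Set.empty
  let s := k1.1.foldl PySem.Set.add s
  let s := k1.2.foldl PySem.Set.add s
  let s := k2.1.foldl PySem.Set.add s
  let s := k2.2.foldl PySem.Set.add s
  if PySem.Set.len s = PySem.List.len k1.1 + PySem.List.len k1.2 + PySem.List.len k2.1 + PySem.List.len k2.2 then
    false
  else
    true

-- ===== PORT B =====
-- any(a == b for a, b in zip(s, s[1:])): scan adjacent pairs of the sorted list
def pvAdjDup : List Int → Bool
  | a :: b :: rest => if a == b then true else pvAdjDup (b :: rest)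
  | _ => false

def Collides_alt (k1 : List Int × List Int) (k2 : List Int × List Int) : Bool :=
  let cat := k1.1 ++ k1.2 ++ k2.1 ++ k2.2
  let s := PySem.List.sorted cat (fun x => x) false
  pvAdjDup s

-- ===== PRECONDITION & SPEC =====
def Spec_Collides (k1 : List Int × List Int) (k2 : List Int × List Int) (out : Bool) : Prop := out = Collides_alt k1 k2
instance (k1 : List Int × List Int) (k2 : List Int × List Int) (out : Bool) : Decidable (Spec_Collides k1 k2 out) := by unfold Spec_Collides; infer_instance

-- ===== CLAIM (what is proved, stated in full; the proofs are below) =====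
def Claim_equal_Collides : Prop := ∀ (k1 : List Int × List Int) (k2 : List Int × List Int), Dom_Collides k1 k2 → Spec_Collides k1 k2 (Collides k1 k2)

-- ===== LEMMAS AND PROOFS =====

-- adding l's elements to s grows the set by at most l.length
theorem pv_len_foldl_add_le (l : List Int) (s : PySem.Set Int) :
    (l.foldl PySem.Set.add s).length ≤ s.length + l.length := by
  induction l generalizing s with
  | nil => simp
  | cons x xs ih =>
    simp only [List.foldl_cons]
    refine le_trans (ih _) ?_
    have h1 : (PySem.Set.add s x).length ≤ s.length + 1 := by
      simp only [PySem.Set.add]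
      split <;> simp
    have h2 : (x :: xs).length = xs.length + 1 := by simp
    omega

-- the set's size equals the number of elements fed in iff nothing repeated
theorem pv_len_foldl_add_iff (l : List Int) (s : PySem.Set Int) (hs : s.Nodup) :
    (l.foldl PySem.Set.add s).length = s.length + l.length ↔ (s ++ l).Nodup := by
  induction l generalizing s with
  | nil => simp [hs]
  | cons x xs ih =>
    simp only [List.foldl_cons]
    by_cases hx : x ∈ s
    · rw [PySem.Set.add_of_mem hx]
      have hle := pv_len_foldl_add_le xs s
      constructor
      · intro h; simp only [List.length_cons] at h; omega
      · intro h
        rw [List.nodup_append] at h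
        exact (h.2.2 x hx x (by simp) rfl).elim
    · rw [PySem.Set.add_of_not_mem hx]
      have hs' : (s ++ [x]).Nodup := by
        rw [List.nodup_append]
        refine ⟨hs, by simp, ?_⟩
        intro a ha b hb hab
        simp only [List.mem_singleton] at hb
        subst hb; subst hab; exact hx ha
      have hih := ih (s ++ [x]) hs'
      have hl : (s ++ [x]).length = s.length + 1 := by simp
      rw [hl] at hih
      have harith : s.length + (x :: xs).length = s.length + 1 + xs.length := by
        simp only [List.length_cons]; omega
      rw [harith, hih, List.append_assoc, List.singleton_append]

-- on a ≤-sorted list, no adjacent duplicate means no duplicate at all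
theorem pv_adjDup_false_iff (l : List Int) (hl : l.Pairwise (· ≤ ·)) :
    pvAdjDup l = false ↔ l.Nodup := by
  induction l with
  | nil => simp [pvAdjDup]
  | cons a t ih =>
    cases t with
    | nil => simp [pvAdjDup]
    | cons b r =>
      have hab : a ≤ b := (List.pairwise_cons.mp hl).1 b (by simp)
      have ht : (b :: r).Pairwise (· ≤ ·) := (List.pairwise_cons.mp hl).2
      by_cases heq : a = b
      · subst heq
        simp [pvAdjDup]
      · have hrec := ih ht
        have hnm : a ∉ b :: r := by
          intro hmem
          rcases List.mem_cons.mp hmem with h | h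
          · exact heq h
          · have hbr : ∀ y ∈ r, b ≤ y := (List.pairwise_cons.mp ht).1
            have : b ≤ a := hbr a h
            exact heq (le_antisymm hab this)
        simp only [pvAdjDup, beq_iff_eq, if_neg heq]
        rw [hrec]
        constructor
        · intro h; exact List.nodup_cons.mpr ⟨hnm, h⟩
        · intro h; exact (List.nodup_cons.mp h).2

-- ===== VERDICT (by name: the statement is the Claim_ definition above) =====
theorem Collides_spec : Claim_equal_Collides := by
  intro k1 k2 _
  obtain ⟨a, b⟩ := k1
  obtain ⟨c, d⟩ := k2
  show Collides (a, b) (c, d) = Collides_alt (a, b) (c, d)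
  unfold Collides Collides_alt
  simp only [PySem.Set.len, PySem.List.len_eq, PySem.Set.empty]
  set cat : List Int := a ++ b ++ c ++ d with hcat
  have hfold : List.foldl PySem.Set.add
      (List.foldl PySem.Set.add
        (List.foldl PySem.Set.add
          (List.foldl PySem.Set.add ([] : PySem.Set Int) a) b) c) d
      = cat.foldl PySem.Set.add ([] : PySem.Set Int) := by
    simp [hcat, List.foldl_append]
  have hiff := pv_len_foldl_add_iff cat ([] : PySem.Set Int) (by simp)
  simp only [List.length_nil, List.nil_append, Nat.zero_add] at hiff
  have hlen : cat.length = a.length + b.length + c.length + d.length := by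
    simp only [hcat, List.length_append]
  have hperm : (PySem.List.sorted cat (fun x => x) false).Perm cat :=
    PySem.List.sorted_perm cat (fun x => x) false
  have hpw : (PySem.List.sorted cat (fun x => x) false).Pairwise (· ≤ ·) := by
    simpa using PySem.List.sorted_pairwise cat (fun x => x)
  have hadj := pv_adjDup_false_iff _ hpw
  have hnd : (PySem.List.sorted cat (fun x => x) false).Nodup ↔ cat.Nodup :=
    hperm.nodup_iff
  simp only [hfold]
  by_cases hN : cat.Nodup
  · have hlenf : (List.foldl PySem.Set.add ([] : PySem.Set Int) cat).length = cat.length :=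
      hiff.mpr hN
    rw [if_pos (by have := hlenf.trans hlen; omega)]
    have hfalse : pvAdjDup (PySem.List.sorted cat (fun x => x) false) = false := by
      rw [hadj, hnd]; exact hN
    exact hfalse.symm
  · have hne : (List.foldl PySem.Set.add ([] : PySem.Set Int) cat).length ≠ cat.length :=
      fun h => hN (hiff.mp h)
    rw [if_neg (by intro h; apply hne; rw [hlen]; omega)]
    have htrue : pvAdjDup (PySem.List.sorted cat (fun x => x) false) = true := by
      rcases Bool.eq_false_or_eq_true (pvAdjDup (PySem.List.sorted cat (fun x => x) false)) with ht | hf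
      · exact ht
      · exact absurd ((hnd).mp ((hadj).mp hf)) hN
    exact htrue.symm
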